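-- pv_equiv track=rewrite | github.com/MeiTianChenMiXiZai/University_Final_Project | rag/nlp/term_weight.py | tokenMerge
-- ===== SOURCE A (Python) =====
-- def tokenMerge(tks):
--     """合并短词"""
--     res, i = [], 0
--     while i < len(tks):
--         if len(tks[i]) == 1:
--             if i + 1 < len(tks) and len(tks[i + 1]) > 1:
--                 res.append(tks[i] + tks[i + 1])
--                 i += 2
--                 continue
--         res.append(tks[i])
--         i += 1
--     return res
-- ===== SOURCE B (Python) =====
-- def tokenMerge(tks):
--     """合并短词"""
--     res = []
--     pending = None  # last seen single-char token awaiting a possible merge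
--     for tk in tks:
--         if pending is not None:
--             if len(tk) > 1:
--                 res.append(pending + tk)
--                 pending = None
--                 continue
--             res.append(pending)
--             pending = None
--         if len(tk) == 1:
--             pending = tk
--         else:
--             res.append(tk)
--     if pending is not None:
--         res.append(pending)
--     return res
-- ===== Notes on version B (the rewrite author's own statement) =====
-- stated objective: simpler
-- what changed: Replaces the index-based while loop with one-token lookahead and index skipping by a plain forward for-loop that keeps a 'pending' single-char token and flushes it after the loop.
import Mathlib
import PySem

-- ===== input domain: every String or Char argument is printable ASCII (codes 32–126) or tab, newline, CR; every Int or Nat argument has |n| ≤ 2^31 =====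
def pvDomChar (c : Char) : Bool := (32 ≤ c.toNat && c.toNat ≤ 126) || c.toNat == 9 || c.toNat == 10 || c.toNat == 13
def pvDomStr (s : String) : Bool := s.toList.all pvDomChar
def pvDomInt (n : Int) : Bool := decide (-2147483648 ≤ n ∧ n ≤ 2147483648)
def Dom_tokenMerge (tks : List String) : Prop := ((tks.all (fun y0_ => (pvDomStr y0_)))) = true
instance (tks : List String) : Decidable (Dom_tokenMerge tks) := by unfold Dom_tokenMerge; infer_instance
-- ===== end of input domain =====

-- B replaces A's index-based while loop (with lookahead and index skipping) by a plain
-- forward pass holding a 'pending' single-char token; same return value, objective: simpler.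

-- ===== PORT A =====
-- A's while loop advances i by 1 or 2; ported as the corresponding list recursion with
-- the same branch structure and the same merge condition.
def tokenMerge (tks : List String) : List String :=
  match tks with
  | [] => []
  | [t] => [t]          -- i+1 < len(tks) fails, so tks[i] is appended alone
  | t :: u :: rest =>
    if PySem.Str.len t = 1 ∧ 1 < PySem.Str.len u then
      (t ++ u) :: tokenMerge rest            -- res.append(tks[i] + tks[i+1]); i += 2
    else
      t :: tokenMerge (u :: rest)            -- res.append(tks[i]); i += 1

-- ===== PORT B =====
-- one step of Source B's for-loop over state (res, pending)
def tokenMergeAltStep (st : List String × Option String) (tk : String) :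
    List String × Option String :=
  match st with
  | (res, some p) =>
    if 1 < PySem.Str.len tk then (res ++ [p ++ tk], none)
    else
      -- emit pending, then re-examine tk
      if PySem.Str.len tk = 1 then (res ++ [p], some tk)
      else (res ++ [p] ++ [tk], none)
  | (res, none) =>
    if PySem.Str.len tk = 1 then (res, some tk)
    else (res ++ [tk], none)

def tokenMerge_alt (tks : List String) : List String :=
  let st := tks.foldl tokenMergeAltStep ([], none)
  match st.2 with
  | some p => st.1 ++ [p]     -- flush the trailing pending char
  | none => st.1

-- ===== PRECONDITION & SPEC =====
def Spec_tokenMerge (tks : List String) (out : List String) : Prop := out = tokenMerge_alt tks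
instance (tks : List String) (out : List String) : Decidable (Spec_tokenMerge tks out) := by unfold Spec_tokenMerge; infer_instance

-- ===== CLAIM (what is proved, stated in full; the proofs are below) =====
def Claim_equal_tokenMerge : Prop := ∀ (tks : List String), Dom_tokenMerge tks → Spec_tokenMerge tks (tokenMerge tks)

-- ===== LEMMAS AND PROOFS =====
def pvFlush (st : List String × Option String) : List String :=
  match st.2 with
  | some p => st.1 ++ [p]
  | none => st.1

theorem tokenMerge_cons2 (t u : String) (rest : List String) :
    tokenMerge (t :: u :: rest) =
      if PySem.Str.len t = 1 ∧ 1 < PySem.Str.len u then (t ++ u) :: tokenMerge rest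
      else t :: tokenMerge (u :: rest) := rfl

theorem step_some (res : List String) (p tk : String) :
    tokenMergeAltStep (res, some p) tk =
      if 1 < PySem.Str.len tk then (res ++ [p ++ tk], none)
      else if PySem.Str.len tk = 1 then (res ++ [p], some tk)
      else (res ++ [p] ++ [tk], none) := rfl

theorem step_none (res : List String) (tk : String) :
    tokenMergeAltStep (res, none) tk =
      if PySem.Str.len tk = 1 then (res, some tk) else (res ++ [tk], none) := rfl

theorem tokenMerge_cons_of_len_ne_one (tk : String) (rest : List String)
    (h : ¬ PySem.Str.len tk = 1) : tokenMerge (tk :: rest) = tk :: tokenMerge rest := by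
  cases rest with
  | nil => rfl
  | cons u r =>
    rw [tokenMerge_cons2, if_neg]
    intro hc; exact h hc.1

def pvTail : Option String → List String → List String
  | none, tks => tokenMerge tks
  | some p, tks => tokenMerge (p :: tks)

theorem pvTail_none (tks : List String) : pvTail none tks = tokenMerge tks := rfl
theorem pvTail_some (p : String) (tks : List String) :
    pvTail (some p) tks = tokenMerge (p :: tks) := rfl

theorem pvKey (tks : List String) : ∀ (res : List String) (pend : Option String),
    (∀ p, pend = some p → PySem.Str.len p = 1) →
    pvFlush (tks.foldl tokenMergeAltStep (res, pend)) = res ++ pvTail pend tks := by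
  induction tks with
  | nil =>
    intro res pend _
    cases pend with
    | none => simp [pvFlush, pvTail, tokenMerge]
    | some p => simp [pvFlush, pvTail, tokenMerge]
  | cons tk rest ih =>
    intro res pend hp
    cases pend with
    | none =>
      rw [List.foldl_cons, step_none]
      by_cases h1 : PySem.Str.len tk = 1
      · rw [if_pos h1, ih res (some tk) (by intro p hpq; cases hpq; exact h1),
          pvTail_some, pvTail_none]
      · rw [if_neg h1, ih (res ++ [tk]) none (by intro p h; cases h),
          pvTail_none, pvTail_none, tokenMerge_cons_of_len_ne_one tk rest h1]
        simp
    | some p =>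
      have hp1 : PySem.Str.len p = 1 := hp p rfl
      rw [List.foldl_cons, step_some]
      by_cases hbig : 1 < PySem.Str.len tk
      · rw [if_pos hbig, ih (res ++ [p ++ tk]) none (by intro q h; cases h),
          pvTail_none, pvTail_some, tokenMerge_cons2, if_pos ⟨hp1, hbig⟩]
        simp
      · have hcond : ¬ (PySem.Str.len p = 1 ∧ 1 < PySem.Str.len tk) := by
          intro hc; exact hbig hc.2
        rw [if_neg hbig]
        by_cases h1 : PySem.Str.len tk = 1
        · rw [if_pos h1, ih (res ++ [p]) (some tk) (by intro q hq; cases hq; exact h1),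
            pvTail_some, pvTail_some, tokenMerge_cons2, if_neg hcond]
          simp
        · rw [if_neg h1, ih (res ++ [p] ++ [tk]) none (by intro q h; cases h),
            pvTail_none, pvTail_some, tokenMerge_cons2, if_neg hcond,
            tokenMerge_cons_of_len_ne_one tk rest h1]
          simp

-- ===== VERDICT (by name: the statement is the Claim_ definition above) =====
theorem tokenMerge_spec : Claim_equal_tokenMerge := by
  intro tks _
  unfold Spec_tokenMerge tokenMerge_alt
  have h := pvKey tks [] none (by intro p h; cases h)
  rw [pvTail_none] at h
  simpa [pvFlush] using h.symm
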